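-- pv_equiv track=rewrite | github.com/qlitre/qlitre-utils | src/qlitreutils/array.py | generate_zigzag_indices
-- ===== SOURCE A (Python) =====
-- def generate_zigzag_indices(arr: list) -> list:
--     """
--     二次元配列に対して、ジグザグに要素にアクセスするためのインデックスのリストを生成する。
--     :param arr: 二次元配列（リストのリスト）
--     :return: ジグザグに要素にアクセスするための行と列のインデックスのリスト（リストのリスト）
--     """
--     h = len(arr)
--     w = len(arr[0])
--     ret = []
--     for i in range(h):
--         if i % 2 == 0:
--             for j in range(w):
--                 ret.append([i, j])
--         else:
--             for j in reversed(range(w)):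
--                 ret.append([i, j])
--
--     return ret
-- ===== SOURCE B (Python) =====
-- def generate_zigzag_indices(arr: list) -> list:
--     h = len(arr)
--     w = len(arr[0])
--     ret = []
--     for k in range(h * w):
--         i, j = divmod(k, w)
--         ret.append([i, j if i % 2 == 0 else w - 1 - j])
--     return ret
-- ===== Notes on version B (the rewrite author's own statement) =====
-- stated objective: alternative
-- what changed: Replaces the nested forward/reversed row loops by a single flat loop over k in range(h*w) that derives the row and the zigzag column arithmetically via divmod.
import Mathlib
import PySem

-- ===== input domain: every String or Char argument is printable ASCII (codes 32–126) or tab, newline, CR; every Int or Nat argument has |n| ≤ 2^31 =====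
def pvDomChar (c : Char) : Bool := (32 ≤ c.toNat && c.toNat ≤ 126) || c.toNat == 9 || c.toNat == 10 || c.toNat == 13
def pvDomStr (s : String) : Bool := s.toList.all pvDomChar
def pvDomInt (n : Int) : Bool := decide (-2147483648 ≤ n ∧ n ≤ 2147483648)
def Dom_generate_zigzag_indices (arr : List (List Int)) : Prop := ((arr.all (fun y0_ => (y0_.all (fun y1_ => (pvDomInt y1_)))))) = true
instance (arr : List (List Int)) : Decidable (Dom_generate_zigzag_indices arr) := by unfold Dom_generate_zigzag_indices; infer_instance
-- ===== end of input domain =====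

-- B replaces A's nested forward/reversed row loops by one flat divmod loop over range(h*w); same cost (alternative decomposition).

-- ===== PORT A =====
def generate_zigzag_indices (arr : List (List Int)) : List (List Int) :=
  let h : Int := arr.length
  -- arr[0]: Python raises IndexError on arr = []; Pre_ excludes that input (the .getD [] default is never reached inside Pre_)
  let w : Int := ((PySem.List.pyGet? arr 0).getD []).length
  (PySem.List.pyRange 0 h 1).foldl (fun ret i =>
    if PySem.Int.mod i 2 == 0 then
      (PySem.List.pyRange 0 w 1).foldl (fun r j => r ++ [[i, j]]) ret
    else
      (PySem.List.pyRange 0 w 1).reverse.foldl (fun r j => r ++ [[i, j]]) ret) []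

-- ===== PORT B =====
def generate_zigzag_indices_alt (arr : List (List Int)) : List (List Int) :=
  let h : Int := arr.length
  -- arr[0]: Python raises IndexError on arr = []; Pre_ excludes that input
  let w : Int := ((PySem.List.pyGet? arr 0).getD []).length
  (PySem.List.pyRange 0 (h * w) 1).foldl (fun ret k =>
    let i := PySem.Int.floordiv k w
    let j := PySem.Int.mod k w
    ret ++ [[i, if PySem.Int.mod i 2 == 0 then j else w - 1 - j]]) []

-- ===== PRECONDITION & SPEC =====
-- Python A evaluates arr[0] and raises IndexError on the empty list; Pre_ excludes exactly that input (B raises there too).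
def Pre_generate_zigzag_indices (arr : List (List Int)) : Prop := arr ≠ []
instance (arr : List (List Int)) : Decidable (Pre_generate_zigzag_indices arr) := by unfold Pre_generate_zigzag_indices; infer_instance
def pvWitness_generate_zigzag_indices : List (List Int) := [[1, 2], [3, 4], [5, 6]]

def Spec_generate_zigzag_indices (arr : List (List Int)) (out : List (List Int)) : Prop := out = generate_zigzag_indices_alt arr
instance (arr : List (List Int)) (out : List (List Int)) : Decidable (Spec_generate_zigzag_indices arr out) := by unfold Spec_generate_zigzag_indices; infer_instance

-- ===== CLAIM (what is proved, stated in full; the proofs are below) =====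
def Claim_equal_generate_zigzag_indices : Prop := ∀ (arr : List (List Int)), Dom_generate_zigzag_indices arr → Pre_generate_zigzag_indices arr → Spec_generate_zigzag_indices arr (generate_zigzag_indices arr)

-- ===== LEMMAS AND PROOFS =====

-- the common normal form: row i of the zigzag traversal of an h×w grid, over Nat indices
def zigzagRow (wn : Nat) (i : Nat) : List (List Int) :=
  (List.range wn).map (fun (j : Nat) => [(i : Int), if i % 2 = 0 then (j : Int) else (wn : Int) - 1 - (j : Int)])

theorem reverse_range_eq_map (n : Nat) :
    (List.range n).reverse = (List.range n).map (fun j => n - 1 - j) := by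
  apply List.ext_getElem
  · simp
  · intro k h1 h2
    simp only [List.getElem_reverse, List.length_range, List.getElem_range, List.getElem_map]

-- one iteration of A's outer loop appends exactly zigzagRow wn a
theorem stepA_eq (wn a : Nat) (acc : List (List Int)) :
    (if PySem.Int.mod (a : Int) 2 == 0 then
      (PySem.List.pyRange 0 (wn : Int) 1).foldl (fun r j => r ++ [[(a : Int), j]]) acc
    else
      (PySem.List.pyRange 0 (wn : Int) 1).reverse.foldl (fun r j => r ++ [[(a : Int), j]]) acc)
    = acc ++ zigzagRow wn a := by
  by_cases h : a % 2 = 0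
  · rw [if_pos (by simp; omega)]
    rw [PySem.List.foldl_append_singleton_eq_map, PySem.List.pyRange_zero_nat, List.map_map]
    unfold zigzagRow
    congr 1
    apply List.map_congr_left
    intro j _
    simp [Function.comp, h]
  · rw [if_neg (by simp; omega)]
    rw [PySem.List.foldl_append_singleton_eq_map, PySem.List.pyRange_zero_nat,
        ← List.map_reverse, reverse_range_eq_map, List.map_map, List.map_map]
    unfold zigzagRow
    congr 1
    apply List.map_congr_left
    intro j hj
    simp only [List.mem_range] at hj
    simp only [Function.comp_apply, if_neg h]
    have : ((wn - 1 - j : Nat) : Int) = (wn : Int) - 1 - (j : Int) := by omega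
    rw [this]

theorem loopA_eq (wn : Nat) (l : List Nat) (acc : List (List Int)) :
    (List.map (fun k : Nat => (k : Int)) l).foldl (fun ret i =>
      if PySem.Int.mod i 2 == 0 then
        (PySem.List.pyRange 0 (wn : Int) 1).foldl (fun r j => r ++ [[i, j]]) ret
      else
        (PySem.List.pyRange 0 (wn : Int) 1).reverse.foldl (fun r j => r ++ [[i, j]]) ret) acc
    = acc ++ l.flatMap (zigzagRow wn) := by
  induction l generalizing acc with
  | nil => simp
  | cons a t ih =>
    simp only [List.map_cons, List.foldl_cons, List.flatMap_cons]
    rw [ih, stepA_eq, List.append_assoc]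

theorem portA_eq (arr : List (List Int)) :
    generate_zigzag_indices arr =
      (List.range arr.length).flatMap (zigzagRow ((PySem.List.pyGet? arr 0).getD []).length) := by
  simp only [generate_zigzag_indices]
  rw [PySem.List.pyRange_zero_nat arr.length, loopA_eq, List.nil_append]

-- flattening range (h*w) into h blocks of w
theorem map_range_mul {β : Type} (h w : Nat) (F : Nat → β) :
    (List.range (h * w)).map F
      = (List.range h).flatMap (fun i => (List.range w).map (fun j => F (i * w + j))) := by
  induction h with
  | zero => simp
  | succ h ih =>
    rw [Nat.succ_mul, List.range_add, List.map_append, List.map_map, ih,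
        List.range_succ, List.flatMap_append]
    simp [Function.comp]

theorem rowB_eq (wn i : Nat) :
    (List.range wn).map (fun j =>
      [PySem.Int.floordiv ((i * wn + j : Nat) : Int) (wn : Int),
       if PySem.Int.mod (PySem.Int.floordiv ((i * wn + j : Nat) : Int) (wn : Int)) 2 == 0 then
         PySem.Int.mod ((i * wn + j : Nat) : Int) (wn : Int)
       else (wn : Int) - 1 - PySem.Int.mod ((i * wn + j : Nat) : Int) (wn : Int)])
    = zigzagRow wn i := by
  unfold zigzagRow
  apply List.map_congr_left
  intro j hj
  simp only [List.mem_range] at hj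
  have hw : 0 < wn := Nat.lt_of_le_of_lt (Nat.zero_le j) hj
  have h1 : (i * wn + j) / wn = i := by
    rw [Nat.add_comm, Nat.add_mul_div_right _ _ hw, Nat.div_eq_of_lt hj, Nat.zero_add]
  have h2 : (i * wn + j) % wn = j := by
    rw [Nat.add_comm, Nat.add_mul_mod_self_right, Nat.mod_eq_of_lt hj]
  simp only [PySem.Int.floordiv_natCast, PySem.Int.mod_natCast, h1, h2]
  by_cases h : i % 2 = 0 <;> simp [h] <;> omega

theorem portB_eq (arr : List (List Int)) :
    generate_zigzag_indices_alt arr =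
      (List.range arr.length).flatMap (zigzagRow ((PySem.List.pyGet? arr 0).getD []).length) := by
  simp only [generate_zigzag_indices_alt]
  rw [PySem.List.foldl_append_singleton_eq_map
        (fun k => [PySem.Int.floordiv k (((PySem.List.pyGet? arr 0).getD []).length : Int),
          if PySem.Int.mod (PySem.Int.floordiv k (((PySem.List.pyGet? arr 0).getD []).length : Int)) 2 == 0 then
            PySem.Int.mod k (((PySem.List.pyGet? arr 0).getD []).length : Int)
          else (((PySem.List.pyGet? arr 0).getD []).length : Int) - 1
               - PySem.Int.mod k (((PySem.List.pyGet? arr 0).getD []).length : Int)]),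
      List.nil_append, ← Nat.cast_mul, PySem.List.pyRange_zero_nat, List.map_map,
      map_range_mul]
  refine congrArg (fun F => List.flatMap F (List.range arr.length)) (funext fun i => ?_)
  rw [← rowB_eq ((PySem.List.pyGet? arr 0).getD []).length i]
  apply List.map_congr_left
  intro j _
  simp [Function.comp]

-- ===== VERDICT (by name: the statement is the Claim_ definition above) =====
theorem generate_zigzag_indices_spec : Claim_equal_generate_zigzag_indices := by
  intro arr _ _
  unfold Spec_generate_zigzag_indices
  rw [portA_eq, portB_eq]
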